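-- pv_equiv track=rewrite | github.com/ignitedata-ai/rosetta-teamVyom-forge2026-igniteai-hackathon | core/rosetta/parser.py | _looks_like_date_format
-- ===== SOURCE A (Python) =====
-- def _looks_like_date_format(fmt: str) -> bool:
--     """Return True if the number_format contains date/time tokens (y / m / d / h / s)
--     *outside* quoted sections. Excel uses the same 'm' for minutes and months;
--     we err on the side of calling anything with these tokens a date format,
--     which is correct for the Dealer fixture.
--     """
--     in_quotes = False
--     for ch in fmt:
--         if ch == '"':
--             in_quotes = not in_quotes
--             continue
--         if in_quotes:
--             continue
--         if ch in "ymdhs":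
--             return True
--     return False
-- ===== SOURCE B (Python) =====
-- def _looks_like_date_format(fmt: str) -> bool:
--     """Split on '"': even-indexed segments are the text outside quotes."""
--     segments = fmt.split('"')
--     outside = segments[::2]
--     return any(ch in "ymdhs" for seg in outside for ch in seg)
-- ===== Notes on version B (the rewrite author's own statement) =====
-- stated objective: simpler
-- what changed: Replaces the explicit in_quotes state machine and char-by-char loop with a split-then-scan decomposition: split the string on the double-quote character, and check only the even-indexed segments, which are exactly the text outside quotes.
import Mathlib
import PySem

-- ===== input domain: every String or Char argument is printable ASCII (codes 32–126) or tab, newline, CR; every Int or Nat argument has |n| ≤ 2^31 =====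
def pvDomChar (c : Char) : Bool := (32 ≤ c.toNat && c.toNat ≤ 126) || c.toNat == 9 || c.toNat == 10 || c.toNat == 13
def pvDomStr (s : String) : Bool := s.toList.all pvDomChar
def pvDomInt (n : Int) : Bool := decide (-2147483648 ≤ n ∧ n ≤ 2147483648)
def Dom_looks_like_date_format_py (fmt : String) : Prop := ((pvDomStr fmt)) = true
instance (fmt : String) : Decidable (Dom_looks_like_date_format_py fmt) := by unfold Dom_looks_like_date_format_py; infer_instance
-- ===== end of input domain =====

-- B replaces A's in_quotes state machine by split-on-quote + even-segment scan (objective: simpler).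


-- ===== PORT A =====
-- A's for-loop with its in_quotes flag, continue and early return, as structural recursion
def pvScanA : Bool → List Char → Bool
  | _, [] => false
  | inq, c :: cs =>
    if c = '"' then pvScanA (!inq) cs
    else if inq then pvScanA inq cs
    else if ("ymdhs".toList.contains c) then true
    else pvScanA inq cs

def looks_like_date_format_py (fmt : String) : Bool := pvScanA false fmt.toList

-- ===== PORT B =====
-- fmt.split('"') hand-ported on List Char (exact: the separator is the single char '"', so
-- Python's split cuts at every '"' and keeps empty pieces — one piece more than quotes)
def pvSplitQ : List Char → List (List Char)
  | [] => [[]]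
  | c :: cs =>
    if c = '"' then [] :: pvSplitQ cs
    else
      match pvSplitQ cs with
      | [] => [[c]]
      | s :: rest => (c :: s) :: rest

-- segments[::2] (step 2 from index 0: keep one, drop one)
def pvEvens : List (List Char) → List (List Char)
  | [] => []
  | [s] => [s]
  | s :: _ :: rest => s :: pvEvens rest

def looks_like_date_format_py_alt (fmt : String) : Bool :=
  (pvEvens (pvSplitQ fmt.toList)).any (fun seg => seg.any (fun ch => "ymdhs".toList.contains ch))

-- ===== PRECONDITION & SPEC =====
def Spec_looks_like_date_format_py (fmt : String) (out : Bool) : Prop := out = looks_like_date_format_py_alt fmt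
instance (fmt : String) (out : Bool) : Decidable (Spec_looks_like_date_format_py fmt out) := by unfold Spec_looks_like_date_format_py; infer_instance

-- ===== CLAIM (what is proved, stated in full; the proofs are below) =====
def Claim_equal_looks_like_date_format_py : Prop := ∀ (fmt : String), Dom_looks_like_date_format_py fmt → Spec_looks_like_date_format_py fmt (looks_like_date_format_py fmt)

-- ===== LEMMAS AND PROOFS =====

def pvP (c : Char) : Bool := "ymdhs".toList.contains c

-- "some even-indexed segment has a token", by the same keep-one-drop-one recursion as pvEvens
theorem pvP_unfold : pvP = fun ch => "ymdhs".toList.contains ch := rfl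

def pvCheckE : List (List Char) → Bool
  | [] => false
  | [s] => s.any pvP
  | s :: _ :: rest => s.any pvP || pvCheckE rest

theorem pvEvens_any (l : List (List Char)) :
    (pvEvens l).any (fun seg => seg.any (fun ch => "ymdhs".toList.contains ch)) = pvCheckE l := by
  induction l using pvEvens.induct <;> simp_all [pvEvens, pvCheckE, pvP_unfold]

theorem pvSplitQ_ne_nil (cs : List Char) : pvSplitQ cs ≠ [] := by
  cases cs with
  | nil => simp [pvSplitQ]
  | cons c cs =>
    simp only [pvSplitQ]
    split
    · simp
    · split <;> simp

theorem pvCheckE_cons (s : List Char) (rest : List (List Char)) :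
    pvCheckE (s :: rest) = (s.any pvP || pvCheckE rest.tail) := by
  cases rest with
  | nil => simp [pvCheckE]
  | cons t r => simp [pvCheckE]

theorem pvScan_eq (cs : List Char) :
    pvScanA false cs = pvCheckE (pvSplitQ cs) ∧
    pvScanA true cs = pvCheckE (pvSplitQ cs).tail := by
  induction cs with
  | nil => simp [pvScanA, pvSplitQ, pvCheckE]
  | cons c cs ih =>
    obtain ⟨ih₁, ih₂⟩ := ih
    by_cases hq : c = '"'
    · subst hq
      refine ⟨?_, ?_⟩
      · simp [pvScanA, pvSplitQ, ih₂, pvCheckE_cons]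
      · simp [pvScanA, pvSplitQ, ih₁]
    · obtain ⟨s, rest, hsr⟩ : ∃ s rest, pvSplitQ cs = s :: rest := by
        cases h : pvSplitQ cs with
        | nil => exact absurd h (pvSplitQ_ne_nil cs)
        | cons s rest => exact ⟨s, rest, rfl⟩
      have hsplit : pvSplitQ (c :: cs) = (c :: s) :: rest := by
        simp [pvSplitQ, hq, hsr]
      refine ⟨?_, ?_⟩
      · rw [hsplit, pvCheckE_cons, List.any_cons]
        cases hpc : ("ymdhs".toList.contains c) with
        | true =>
          replace hpc : c = 'y' ∨ c = 'm' ∨ c = 'd' ∨ c = 'h' ∨ c = 's' := by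
            simpa using hpc
          have hA : pvScanA false (c :: cs) = true := by
            rcases hpc with h | h | h | h | h <;> subst h <;> simp [pvScanA, hq]
          rw [hA]
          simp only [pvP]
          simp
          tauto
        | false =>
          obtain ⟨h1, h2, h3, h4, h5⟩ :
              c ≠ 'y' ∧ c ≠ 'm' ∧ c ≠ 'd' ∧ c ≠ 'h' ∧ c ≠ 's' := by
            simpa [not_or] using hpc
          have hA : pvScanA false (c :: cs) = pvScanA false cs := by
            simp [pvScanA, hq, h1, h2, h3, h4, h5]
          rw [hA, ih₁, hsr, pvCheckE_cons]
          simp only [pvP]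
          simp [h1, h2, h3, h4, h5]
      · rw [hsplit]
        simp [pvScanA, hq, ih₂, hsr]

-- ===== VERDICT (by name: the statement is the Claim_ definition above) =====
theorem looks_like_date_format_py_spec : Claim_equal_looks_like_date_format_py := by
  intro fmt _
  unfold Spec_looks_like_date_format_py looks_like_date_format_py looks_like_date_format_py_alt
  rw [pvEvens_any, (pvScan_eq fmt.toList).1]
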